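-- pv_equiv track=rewrite | github.com/hockey-stats/chart-plotting | plotting/plot.py | handle_player_full_names
-- ===== SOURCE A (Python) =====
-- def handle_player_full_names(names):
--     """
--     Generally skater names will be displayed as just their last names. This function will be
--     called in the event that multiple skaters share a last name, and will adjust their last names
--     to also show their first initials (e.g. Nylander -> W. Nylander and A. Nylander).
--
--     :param list names: List of full names.
--     """
--     last_names = [name.split()[-1] for name in names]
--     seen = set()
--     dupes = [name for name in last_names if name in seen or seen.add(name)]
--     final_names = []
--     for name in names:
--         last_name = name.split()[-1]
--         if last_name in dupes:
--             initial = name.split()[0][0]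
--             display_name = f'{initial}. {last_name}'
--             final_names.append(display_name)
--         else:
--             final_names.append(last_name)
--     return final_names
-- ===== SOURCE B (Python) =====
-- def handle_player_full_names(names):
--     # Single pass with retroactive patching: emit the bare last name optimistically;
--     # on meeting a later holder of the same last name, patch the earlier entries in place.
--     result = []
--     seen = {}  # last name -> list of (index in result, decorated form) emitted so far
--     for name in names:
--         parts = name.split()
--         last = parts[-1]
--         decorated = f'{parts[0][0]}. {last}'
--         if last in seen:
--             for j, d in seen[last]:
--                 result[j] = d
--             seen[last].append((len(result), decorated))
--             result.append(decorated)
--         else: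
--             seen[last] = [(len(result), decorated)]
--             result.append(last)
--     return result
-- ===== Notes on version B (the rewrite author's own statement) =====
-- stated objective: faster
-- what changed: Replaces A's two staged passes (collect duplicated last names into a dupes list, then format every name against a linear membership scan of it) with a single pass that optimistically emits each bare last name and, on meeting a later holder of the same last name, retroactively patches the earlier entries in place via a dict of (index, decorated) records.
import Mathlib
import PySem

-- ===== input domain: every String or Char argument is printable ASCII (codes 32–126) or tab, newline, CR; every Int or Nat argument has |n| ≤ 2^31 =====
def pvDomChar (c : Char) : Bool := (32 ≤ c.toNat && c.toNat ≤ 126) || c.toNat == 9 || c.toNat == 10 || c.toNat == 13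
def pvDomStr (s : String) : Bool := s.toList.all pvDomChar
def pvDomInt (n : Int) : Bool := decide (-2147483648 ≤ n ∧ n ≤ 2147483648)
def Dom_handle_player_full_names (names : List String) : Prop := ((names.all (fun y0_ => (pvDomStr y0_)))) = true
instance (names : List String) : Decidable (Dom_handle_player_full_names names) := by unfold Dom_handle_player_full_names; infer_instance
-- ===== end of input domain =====

-- B replaces A's two staged passes (collect duplicated last names, then format) with a single
-- pass that emits bare last names optimistically and retroactively patches earlier entries in
-- place when a later holder of the same last name appears.

-- ===== PORT A =====
-- name.split()[-1] (Pre_ guarantees the split is nonempty, so the default is never used)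
def pvLast (name : String) : String :=
  (PySem.List.pyGet? (PySem.Str.split₀ name) (-1)).getD ""

-- name.split()[0][0] as a one-character string (Pre_ guarantees a first word exists; split₀ words are nonempty)
def pvInitial (name : String) : String :=
  ((PySem.Str.pyGet? ((PySem.List.pyGet? (PySem.Str.split₀ name) 0).getD "") 0).map
    (fun c => String.ofList [c])).getD ""

def handle_player_full_names (names : List String) : List String :=
  let last_names := names.map (fun name => pvLast name)
  let dupes := (last_names.foldl
      (fun (st : PySem.Set String × List String) name =>
        if PySem.Set.contains st.1 name then (st.1, st.2 ++ [name])
        else (PySem.Set.add st.1 name, st.2))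
      (PySem.Set.empty, [])).2
  names.foldl (fun final_names name =>
      let last_name := pvLast name
      if last_name ∈ dupes then
        final_names ++ [pvInitial name ++ ". " ++ last_name]
      else
        final_names ++ [last_name]) []

-- ===== PORT B =====
-- f'{parts[0][0]}. {last}'
def pvDec (name : String) : String := pvInitial name ++ ". " ++ pvLast name

-- one loop iteration of B: patch earlier entries sharing this last name, then append.
-- Stored indices are lengths of the result list at emission time, hence always in range,
-- so Python's result[j] = d is exactly List.set.
def pvStepB (st : List String × PySem.Dict String (List (Nat × String))) (name : String) :
    List String × PySem.Dict String (List (Nat × String)) :=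
  let last := pvLast name
  let decorated := pvDec name
  if st.2.contains last then
    let res := (st.2.getD last []).foldl (fun (r : List String) (p : Nat × String) => r.set p.1 p.2) st.1
    (res ++ [decorated], st.2.modify last [] (fun e => e ++ [(res.length, decorated)]))
  else
    (st.1 ++ [last], st.2.insert last [(st.1.length, decorated)])

def handle_player_full_names_alt (names : List String) : List String :=
  (names.foldl pvStepB ([], PySem.Dict.empty)).1

-- ===== PRECONDITION & SPEC =====
-- Pre_ excludes exactly the inputs containing an empty/all-whitespace name, on which both Pythons raise IndexError at name.split()[-1].
def Pre_handle_player_full_names (names : List String) : Prop :=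
  ∀ name ∈ names, PySem.Str.split₀ name ≠ []
instance (names : List String) : Decidable (Pre_handle_player_full_names names) := by
  unfold Pre_handle_player_full_names; infer_instance

def pvWitness_handle_player_full_names : List String :=
  ["W Nylander", "A Nylander", "Bo Horvat"]

def Spec_handle_player_full_names (names : List String) (out : List String) : Prop := out = handle_player_full_names_alt names
instance (names : List String) (out : List String) : Decidable (Spec_handle_player_full_names names out) := by unfold Spec_handle_player_full_names; infer_instance

-- ===== CLAIM (what is proved, stated in full; the proofs are below) =====
def Claim_equal_handle_player_full_names : Prop := ∀ (names : List String), Dom_handle_player_full_names names → Pre_handle_player_full_names names → Spec_handle_player_full_names names (handle_player_full_names names)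

-- ===== LEMMAS AND PROOFS =====

-- the common value both programs compute at each position: initialled iff the last name repeats in ctx
def pvFmt (ctx : List String) (n : String) : String :=
  if 2 ≤ (ctx.map pvLast).count (pvLast n) then pvDec n else pvLast n

-- A's dupes fold: membership in the collected dupes list ↔ already in the prior state or seen at least twice.
theorem dupes_fold_mem (xs : List String) (s d : List String) (l : String) :
    l ∈ (xs.foldl
      (fun (st : PySem.Set String × List String) name =>
        if PySem.Set.contains st.1 name then (st.1, st.2 ++ [name])
        else (PySem.Set.add st.1 name, st.2)) (s, d)).2 ↔
      l ∈ d ∨ (l ∈ s ∧ l ∈ xs) ∨ 2 ≤ xs.count l := by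
  induction xs generalizing s d with
  | nil => simp
  | cons x xs ih =>
    simp only [List.foldl_cons]
    by_cases hx : x ∈ s
    · rw [if_pos (by simpa [PySem.Set.contains_iff] using hx)]
      rw [ih]
      by_cases hlx : l = x
      · subst hlx
        simp [hx]
      · simp [List.mem_cons, hlx, Ne.symm hlx]
    · rw [if_neg (by simpa [PySem.Set.contains_iff] using hx)]
      rw [ih]
      by_cases hlx : l = x
      · subst hlx
        simp only [PySem.Set.mem_add, List.mem_cons, List.count_cons_self]
        constructor
        · rintro (h | ⟨(h | h), h2⟩ | h)
          · exact Or.inl h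
          · exact absurd h hx
          · right; right; have := List.count_pos_iff.mpr h2; omega
          · right; right; have : l ∈ xs := by
              by_contra hc
              simp [List.count_eq_zero_of_not_mem hc] at h
            have := List.count_pos_iff.mpr this; omega
        · rintro (h | ⟨h, _⟩ | h)
          · exact Or.inl h
          · exact absurd h hx
          · have h2 : 1 ≤ xs.count l := by omega
            exact Or.inr (Or.inl ⟨Or.inr trivial, List.count_pos_iff.mp h2⟩)
      · simp [PySem.Set.mem_add, List.mem_cons, hlx, Ne.symm hlx]

theorem foldl_ite_append {A B : Type} (xs : List A) (p : A -> Prop) [DecidablePred p]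
    (u v : A -> B) (acc : List B) :
    xs.foldl (fun acc x => if p x then acc ++ [u x] else acc ++ [v x]) acc
      = acc ++ xs.map (fun x => if p x then u x else v x) := by
  induction xs generalizing acc with
  | nil => simp
  | cons x xs ih =>
    by_cases hx : p x <;> simp [hx, ih]

-- A's result, characterised: each name formatted by whether its last name repeats in the whole list.
theorem A_char (names : List String) :
    handle_player_full_names names = names.map (pvFmt names) := by
  unfold handle_player_full_names
  rw [foldl_ite_append]
  have hd : ∀ l, (l ∈ (((names.map (fun name => pvLast name)).foldl
      (fun (st : PySem.Set String × List String) name =>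
        if PySem.Set.contains st.1 name then (st.1, st.2 ++ [name])
        else (PySem.Set.add st.1 name, st.2))
      (PySem.Set.empty, ([] : List String))).2)) ↔ 2 ≤ (names.map pvLast).count l := by
    intro l
    rw [dupes_fold_mem]
    simp [PySem.Set.empty]
  simp only [hd]
  simp [pvFmt, pvDec]

-- B's patch loop over the stored (index, decorated) entries of one last name l:
-- applied to front ++ pre.map f it rewrites exactly the positions of pre whose last name is l.
theorem patch_fold (l : String) (pre : List String) :
    ∀ (front : List String) (f : String → String),
    (((pre.zipIdx front.length).filter (fun p => pvLast p.1 == l)).map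
        (fun p => (p.2, pvDec p.1))).foldl
      (fun (r : List String) (p : Nat × String) => r.set p.1 p.2) (front ++ pre.map f)
    = front ++ pre.map (fun n => if pvLast n == l then pvDec n else f n) := by
  induction pre with
  | nil => intro front f; simp
  | cons x xs ih =>
    intro front f
    simp only [List.zipIdx_cons, List.filter_cons, List.map_cons]
    by_cases hx : pvLast x == l
    · rw [if_pos hx]
      simp only [List.map_cons, List.foldl_cons]
      have hset : (front ++ f x :: xs.map f).set front.length (pvDec x)
          = (front ++ [pvDec x]) ++ xs.map f := by
        simp
      rw [hset]
      have hlen : front.length + 1 = (front ++ [pvDec x]).length := by simp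
      rw [hlen, ih (front ++ [pvDec x]) f]
      simp [hx]
    · rw [if_neg (by simpa using hx)]
      have hmap : front ++ f x :: xs.map f = (front ++ [f x]) ++ xs.map f := by simp
      rw [hmap]
      have hlen : front.length + 1 = (front ++ [f x]).length := by simp
      rw [hlen, ih (front ++ [f x]) f]
      simp [hx]

-- no earlier holder of l ⇒ no stored entries for l
theorem filter_zipIdx_nil (pre : List String) (l : String) (k : Nat)
    (h : l ∉ pre.map pvLast) :
    (pre.zipIdx k).filter (fun p => pvLast p.1 == l) = [] := by
  apply List.filter_eq_nil_iff.mpr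
  intro p hp
  have h1 : p.1 ∈ pre := List.fst_mem_of_mem_zipIdx hp
  simp only [beq_iff_eq]
  intro hc
  exact h (hc ▸ List.mem_map_of_mem h1)

-- the loop invariant of B's single pass: after processing pre, the result list holds each
-- name of pre formatted w.r.t. pre, and the dict stores, per last name, the (index, decorated)
-- pairs of its holders in pre.
theorem loop_inv (ys : List String) :
    ∀ (pre : List String) (st : List String × PySem.Dict String (List (Nat × String))),
    st.1 = pre.map (pvFmt pre) →
    (∀ l, st.2.getD l [] = ((pre.zipIdx).filter (fun p => pvLast p.1 == l)).map
        (fun p => (p.2, pvDec p.1))) →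
    (∀ l, st.2.contains l = decide (l ∈ pre.map pvLast)) →
    (ys.foldl pvStepB st).1 = (pre ++ ys).map (pvFmt (pre ++ ys)) := by
  induction ys with
  | nil => intro pre st h1 _ _; simpa using h1
  | cons y ys ih =>
    intro pre st h1 h2 h3
    rw [List.foldl_cons, List.append_cons]
    by_cases c : st.2.contains (pvLast y) = true
    · -- duplicate: patch then append decorated
      have hstep : pvStepB st y =
          ((st.2.getD (pvLast y) []).foldl
              (fun (r : List String) (p : Nat × String) => r.set p.1 p.2) st.1 ++ [pvDec y],
            st.2.modify (pvLast y) [] (fun e => e ++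
              [(((st.2.getD (pvLast y) []).foldl
                  (fun (r : List String) (p : Nat × String) => r.set p.1 p.2) st.1).length,
                pvDec y)])) := by
        simp only [pvStepB]
        rw [if_pos c]
      have hmem : pvLast y ∈ pre.map pvLast := by
        have := h3 (pvLast y); rw [c] at this; exact of_decide_eq_true this.symm
      have hres : (st.2.getD (pvLast y) []).foldl
          (fun (r : List String) (p : Nat × String) => r.set p.1 p.2) st.1
          = pre.map (fun n => if pvLast n == pvLast y then pvDec n else pvFmt pre n) := by
        rw [h2, h1]
        have := patch_fold (pvLast y) pre [] (pvFmt pre)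
        simpa using this
      have hres' : (st.2.getD (pvLast y) []).foldl
          (fun (r : List String) (p : Nat × String) => r.set p.1 p.2) st.1
          = pre.map (pvFmt (pre ++ [y])) := by
        rw [hres]
        apply List.map_congr_left
        intro n hn
        by_cases hne : pvLast n = pvLast y
        · have hcnt : 1 ≤ (pre.map pvLast).count (pvLast n) :=
            List.count_pos_iff.mpr (List.mem_map_of_mem hn)
          have h2c : 2 ≤ ((pre ++ [y]).map pvLast).count (pvLast n) := by
            simp only [List.map_append, List.count_append, List.map_cons, List.map_nil]
            have h1c : (([pvLast y] : List String)).count (pvLast n) = 1 := by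
              rw [hne]; simp
            omega
          rw [if_pos (by simpa using hne)]
          unfold pvFmt
          rw [if_pos h2c]
        · have hcc : ((pre ++ [y]).map pvLast).count (pvLast n)
              = (pre.map pvLast).count (pvLast n) := by
            simp only [List.map_append, List.count_append, List.map_cons, List.map_nil]
            have h0c : (([pvLast y] : List String)).count (pvLast n) = 0 :=
              List.count_eq_zero.mpr (by simpa using hne)
            omega
          rw [if_neg (by simpa using hne)]
          unfold pvFmt
          rw [hcc]
      have hlen : ((st.2.getD (pvLast y) []).foldl
          (fun (r : List String) (p : Nat × String) => r.set p.1 p.2) st.1).length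
          = pre.length := by rw [hres']; simp
      have hy : pvFmt (pre ++ [y]) y = pvDec y := by
        have hcnt : 1 ≤ (pre.map pvLast).count (pvLast y) := List.count_pos_iff.mpr hmem
        have h2c : 2 ≤ ((pre ++ [y]).map pvLast).count (pvLast y) := by
          simp only [List.map_append, List.count_append, List.map_cons, List.map_nil]
          have hs : (([pvLast y] : List String)).count (pvLast y) = 1 := by
            rw [List.count_singleton]; simp
          omega
        unfold pvFmt
        rw [if_pos h2c]
      apply ih (pre ++ [y]) (pvStepB st y)
      · rw [hstep]
        show _ ++ _ = _
        rw [hres', List.map_append, List.map_cons, List.map_nil, hy]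
      · intro l
        rw [hstep]
        show (st.2.modify (pvLast y) [] _).getD l [] = _
        rw [PySem.Dict.getD_modify]
        rw [List.zipIdx_append, List.filter_append, List.map_append]
        by_cases hl : l = pvLast y
        · subst hl
          rw [if_pos rfl, hlen, h2]
          simp
        · rw [if_neg hl, h2]
          simp [Ne.symm hl]
      · intro l
        rw [hstep]
        show (st.2.modify (pvLast y) [] _).contains l = _
        rw [PySem.Dict.contains_modify, h3]
        by_cases hl : l = pvLast y <;> simp [hl]
    · -- fresh last name: append it bare, start its entry list
      have hstep : pvStepB st y =
          (st.1 ++ [pvLast y], st.2.insert (pvLast y) [(st.1.length, pvDec y)]) := by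
        simp only [pvStepB]
        rw [if_neg c]
      have hnmem : pvLast y ∉ pre.map pvLast := by
        have := h3 (pvLast y)
        rw [Bool.not_eq_true] at c
        rw [c] at this
        exact of_decide_eq_false this.symm
      apply ih (pre ++ [y]) (pvStepB st y)
      · rw [hstep]
        show _ ++ _ = _
        rw [h1, List.map_append, List.map_cons, List.map_nil]
        congr 1
        · apply List.map_congr_left
          intro n hn
          have hne : pvLast n ≠ pvLast y := by
            intro hc
            exact hnmem (hc ▸ List.mem_map_of_mem hn)
          have hcc : ((pre ++ [y]).map pvLast).count (pvLast n)
              = (pre.map pvLast).count (pvLast n) := by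
            simp only [List.map_append, List.count_append, List.map_cons, List.map_nil]
            have h0c : (([pvLast y] : List String)).count (pvLast n) = 0 :=
              List.count_eq_zero.mpr (by simpa using hne)
            omega
          unfold pvFmt
          rw [hcc]
        · have h1c : ((pre ++ [y]).map pvLast).count (pvLast y) = 1 := by
            simp only [List.map_append, List.count_append, List.map_cons, List.map_nil]
            have hs : (([pvLast y] : List String)).count (pvLast y) = 1 := by
              rw [List.count_singleton]; simp
            have h0c : (pre.map pvLast).count (pvLast y) = 0 :=
              List.count_eq_zero_of_not_mem hnmem
            omega
          unfold pvFmt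
          rw [if_neg (by rw [h1c]; omega)]
      · intro l
        rw [hstep]
        show (st.2.insert (pvLast y) _).getD l [] = _
        rw [PySem.Dict.getD_insert]
        rw [List.zipIdx_append, List.filter_append, List.map_append]
        have hlen : st.1.length = pre.length := by rw [h1]; simp
        by_cases hl : l = pvLast y
        · subst hl
          rw [if_pos rfl, filter_zipIdx_nil pre _ 0 hnmem]
          simp [hlen]
        · rw [if_neg hl, h2]
          simp [Ne.symm hl]
      · intro l
        rw [hstep]
        show (st.2.insert (pvLast y) _).contains l = _
        rw [PySem.Dict.contains_insert, h3]
        by_cases hl : l = pvLast y <;> simp [hl]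

-- B's result, characterised identically.
theorem B_char (names : List String) :
    handle_player_full_names_alt names = names.map (pvFmt names) := by
  unfold handle_player_full_names_alt
  have := loop_inv names [] ([], PySem.Dict.empty)
    (by simp) (by intro l; simp) (by intro l; simp)
  simpa using this

-- ===== VERDICT (by name: the statement is the Claim_ definition above) =====
theorem handle_player_full_names_spec : Claim_equal_handle_player_full_names := by
  intro names _ _
  unfold Spec_handle_player_full_names
  rw [A_char, B_char]
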